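-- pv_equiv track=rewrite | github.com/mmb-irb/MDDB-workflow | mddb_workflow/utils/auxiliar.py | is_glob
-- ===== SOURCE A (Python) =====
-- GLOB_CHARACTERS = ['*', '?', '[']
--
-- def is_glob(path: str) -> bool:
--     """Check if a string has patterns to be parsed by a glob function.
--
--     Note that this is not trivial, but this function should be good enough for our case.
--     https://stackoverflow.com/questions/42283009/check-if-string-is-a-glob-pattern
--     """
--     # Find unescaped glob characters
--     for c, character in enumerate(path):
--         if character not in GLOB_CHARACTERS:
--             continue
--         if c == 0:
--             return True
--         previous_characters = path[c-1]
--         if previous_characters != '\\':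
--             return True
--     return False
-- ===== SOURCE B (Python) =====
-- import re
--
-- _UNESCAPED_GLOB = re.compile(r'(?<!\\)[*?\[]')
--
-- def is_glob(path: str) -> bool:
--     """Check if a string has patterns to be parsed by a glob function."""
--     return bool(_UNESCAPED_GLOB.search(path))
-- ===== Notes on version B (the rewrite author's own statement) =====
-- stated objective: idiomatic
-- what changed: Replaced the explicit index-based scanning loop and one-character-back lookup with a single precompiled regex search using a negative lookbehind, r'(?<!\\)[*?\[]'.
import Mathlib
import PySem

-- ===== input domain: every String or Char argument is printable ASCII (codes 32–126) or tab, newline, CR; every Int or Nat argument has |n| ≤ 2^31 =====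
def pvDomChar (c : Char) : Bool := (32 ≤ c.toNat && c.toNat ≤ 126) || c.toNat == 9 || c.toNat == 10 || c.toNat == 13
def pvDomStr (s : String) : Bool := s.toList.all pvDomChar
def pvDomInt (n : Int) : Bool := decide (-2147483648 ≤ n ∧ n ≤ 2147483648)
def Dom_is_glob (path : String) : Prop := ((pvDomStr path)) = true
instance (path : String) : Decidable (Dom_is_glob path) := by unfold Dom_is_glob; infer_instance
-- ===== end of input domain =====

-- B replaces A's explicit scanning loop with one regex search (negative lookbehind), for idiomatic brevity.


-- ===== PORT A =====
def GLOB_CHARACTERS : List Char := ['*', '?', '[']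

-- the 'for c, character in enumerate(path)' loop, step for step
def isGlobLoop (path : List Char) (c : Nat) : List Char → Bool
  | [] => false
  | character :: rest =>
    if GLOB_CHARACTERS.contains character = false then isGlobLoop path (c + 1) rest
    else if c = 0 then true
    else if PySem.List.pyGetD path ((c : Int) - 1) ' ' ≠ '\\' then true
    else isGlobLoop path (c + 1) rest

def is_glob (path : String) : Bool := isGlobLoop path.toList 0 path.toList

-- ===== PORT B =====
-- hand port of re.search(r'(?<!\\)[*?\[]', path): exact for this fixed pattern —
-- a position matches iff its character is in the class and is not immediately preceded by '\'
def is_glob_alt (path : String) : Bool :=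
  let cs := path.toList
  ((none :: cs.map some).zip cs).any fun pc =>
    (pc.2 == '*' || pc.2 == '?' || pc.2 == '[') && pc.1 ≠ some '\\'

-- ===== PRECONDITION & SPEC =====
def Spec_is_glob (path : String) (out : Bool) : Prop := out = is_glob_alt path
instance (path : String) (out : Bool) : Decidable (Spec_is_glob path out) := by unfold Spec_is_glob; infer_instance

-- ===== CLAIM (what is proved, stated in full; the proofs are below) =====
def Claim_equal_is_glob : Prop := ∀ (path : String), Dom_is_glob path → Spec_is_glob path (is_glob path)

-- ===== LEMMAS AND PROOFS =====

theorem isGlobLoop_eq_any (rest : List Char) : ∀ (path : List Char) (c : Nat),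
    path.drop c = rest →
    isGlobLoop path c rest =
      (((if c = 0 then none else some (PySem.List.pyGetD path ((c : Int) - 1) ' ')) :: rest.map some).zip rest).any
        (fun pc => (pc.2 == '*' || pc.2 == '?' || pc.2 == '[') && pc.1 ≠ some '\\') := by
  induction rest with
  | nil => intro path c h; simp [isGlobLoop]
  | cons ch t ih =>
    intro path c h
    have hc : c < path.length := by
      by_contra hc
      rw [List.drop_eq_nil_of_le (Nat.le_of_not_lt hc)] at h
      exact List.cons_ne_nil ch t h.symm
    have hget : path[c]'hc = ch := by
      have h0 : (path.drop c)[0]'(by simp [h]) = ch := by simp [h]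
      simpa using h0
    have hpg : PySem.List.pyGetD path ((c : Int) + 1 - 1) ' ' = ch := by
      rw [show ((c : Int) + 1 - 1) = ((c : Nat) : Int) by ring]
      simp [pysem, hc, hget]
    have hdrop : path.drop (c + 1) = t := by
      rw [← List.tail_drop, h, List.tail_cons]
    have ihc := ih path (c + 1) hdrop
    rw [if_neg (Nat.succ_ne_zero c), Nat.cast_add, Nat.cast_one, hpg] at ihc
    have hcc : GLOB_CHARACTERS.contains ch = (ch == '*' || ch == '?' || ch == '[') := by
      unfold GLOB_CHARACTERS
      by_cases h1 : ch = '*' <;> by_cases h2 : ch = '?' <;> by_cases h3 : ch = '[' <;>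
        simp [h1, h2, h3]
    rw [isGlobLoop, List.map_cons, List.zip_cons_cons, List.any_cons, ← ihc, hcc]
    by_cases hcl : (ch == '*' || ch == '?' || ch == '[') = true
    · by_cases hc0 : c = 0
      · subst hc0; simp [hcl]
      · by_cases hesc : PySem.List.pyGetD path ((c : Int) - 1) ' ' = '\\'
        · simp [hcl, hc0, hesc]
        · simp [hcl, hc0, hesc]
    · have hcl' : (ch == '*' || ch == '?' || ch == '[') = false := by simpa using hcl
      simp [hcl']

-- ===== VERDICT (by name: the statement is the Claim_ definition above) =====
theorem is_glob_spec : Claim_equal_is_glob := by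
  intro path _
  unfold Spec_is_glob is_glob is_glob_alt
  simpa using isGlobLoop_eq_any path.toList path.toList 0 (by simp)
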